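-- pv_equiv track=rewrite | github.com/hayk314/puzzles | JaneStreet/2019-JULY/puzzleJuly.py | removeNonDistinct_Consonants
-- ===== SOURCE A (Python) =====
-- def removeNonDistinct_Consonants(words, chars):
--     """ remove all words which have non-distinct consonants """
--     res = []
--     for word in words:
--         X = dict()
--         for c in word:
--             if not c in X:
--                 X[c] = 0
--             X[c] += 1
--
--         q = False
--         for c in X:
--             if c in chars and X[c] > 1:
--                 q = True
--                 break
--
--         if q == False:
--             res.append(word)
--
--     return res
-- ===== SOURCE B (Python) =====
-- def removeNonDistinct_Consonants(words, chars):
--     """ remove all words which have non-distinct consonants """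
--     def has_repeated_consonant(word):
--         seen = set()
--         for c in word:
--             if c in chars:
--                 if c in seen:
--                     return True
--                 seen.add(c)
--         return False
--
--     return [word for word in words if not has_repeated_consonant(word)]
-- ===== Notes on version B (the rewrite author's own statement) =====
-- stated objective: simpler
-- what changed: A builds a full per-word character-frequency dict and then scans its keys in a second loop; B makes a single early-exiting pass per word that tracks only the consonants already seen in a set, and selects words with a comprehension.
import Mathlib
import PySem

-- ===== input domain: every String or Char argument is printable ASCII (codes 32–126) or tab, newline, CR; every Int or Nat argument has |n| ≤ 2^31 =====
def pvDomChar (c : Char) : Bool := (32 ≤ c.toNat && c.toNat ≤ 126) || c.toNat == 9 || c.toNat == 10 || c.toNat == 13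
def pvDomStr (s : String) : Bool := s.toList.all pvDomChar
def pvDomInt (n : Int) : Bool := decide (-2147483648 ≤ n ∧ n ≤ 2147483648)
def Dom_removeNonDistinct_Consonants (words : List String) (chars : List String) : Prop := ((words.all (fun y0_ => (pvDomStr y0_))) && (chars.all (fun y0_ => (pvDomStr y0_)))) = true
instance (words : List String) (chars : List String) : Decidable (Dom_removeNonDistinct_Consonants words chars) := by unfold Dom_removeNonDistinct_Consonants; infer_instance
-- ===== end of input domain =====

-- B replaces A's per-word frequency dict + second key scan by a single early-exiting
-- pass tracking only already-seen consonants in a set (objective: simpler).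

-- ===== PORT A =====
-- the inner counting loop: 'if c not in X: X[c] = 0; X[c] += 1'
def pvStepA (X : PySem.Dict Char Int) (c : Char) : PySem.Dict Char Int :=
  let X' := if X.contains c then X else X.insert c 0
  X'.insert c (X'.getD c 0 + 1)

def pvBuildX (word : List Char) : PySem.Dict Char Int :=
  word.foldl pvStepA PySem.Dict.empty

-- 'for c in X: if c in chars and X[c] > 1: q = True; break'  (loop with break over the keys)
def pvQLoop (chars : List String) (X : PySem.Dict Char Int) : List Char → Bool
  | [] => false
  | c :: rest =>
      if chars.contains (String.ofList [c]) && X.getD c 0 > 1 then true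
      else pvQLoop chars X rest

def pvWordBad (chars : List String) (word : String) : Bool :=
  let X := pvBuildX word.toList
  pvQLoop chars X X.keys

def removeNonDistinct_Consonants (words : List String) (chars : List String) : List String :=
  words.foldl (fun res word => if pvWordBad chars word = false then res ++ [word] else res) []

-- ===== PORT B =====
-- one pass over the word, early exit on the first consonant seen twice
def pvHasRep (chars : List String) : List Char → PySem.Set Char → Bool
  | [], _ => false
  | c :: rest, seen =>
      if chars.contains (String.ofList [c]) then
        if PySem.Set.contains seen c then true
        else pvHasRep chars rest (PySem.Set.add seen c)
      else pvHasRep chars rest seen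

def removeNonDistinct_Consonants_alt (words : List String) (chars : List String) : List String :=
  words.filter (fun word => !pvHasRep chars word.toList PySem.Set.empty)

-- ===== PRECONDITION & SPEC =====
def Spec_removeNonDistinct_Consonants (words : List String) (chars : List String) (out : List String) : Prop := out = removeNonDistinct_Consonants_alt words chars
instance (words : List String) (chars : List String) (out : List String) : Decidable (Spec_removeNonDistinct_Consonants words chars out) := by unfold Spec_removeNonDistinct_Consonants; infer_instance

-- ===== CLAIM (what is proved, stated in full; the proofs are below) =====
def Claim_equal_removeNonDistinct_Consonants : Prop := ∀ (words : List String) (chars : List String), Dom_removeNonDistinct_Consonants words chars → Spec_removeNonDistinct_Consonants words chars (removeNonDistinct_Consonants words chars)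

-- ===== LEMMAS AND PROOFS =====

-- counting loop computes occurrence counts
theorem pvBuildX_getD (w : List Char) (d : PySem.Dict Char Int) (c : Char) :
    (w.foldl pvStepA d).getD c 0 = d.getD c 0 + w.count c := by
  induction w generalizing d with
  | nil => simp
  | cons a rest ih =>
      have hstep : ∀ (X : PySem.Dict Char Int) (x : Char),
          (pvStepA X a).getD x 0 = if x = a then X.getD a 0 + 1 else X.getD x 0 := by
        intro X x
        unfold pvStepA
        by_cases h : X.contains a = true
        · simp [h, PySem.Dict.getD_insert]
        · simp only [Bool.not_eq_true] at h
          have h0 : X.getD a 0 = 0 := PySem.Dict.getD_of_not_contains X 0 h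
          by_cases hx : x = a
          · subst hx
            simp [h, PySem.Dict.getD_insert_self, h0]
          · simp [h, PySem.Dict.getD_insert, hx]
      simp only [List.foldl_cons, ih, hstep, List.count_cons]
      by_cases hx : c = a
      · subst hx
        simp
        omega
      · simp [hx]
        exact fun h => hx h.symm

-- keys of the counting loop are the characters seen
theorem pvBuildX_mem_keys (w : List Char) (d : PySem.Dict Char Int) (c : Char) :
    c ∈ (w.foldl pvStepA d).keys ↔ c ∈ d.keys ∨ c ∈ w := by
  induction w generalizing d with
  | nil => simp
  | cons a rest ih =>
      have hstep : ∀ (X : PySem.Dict Char Int),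
          c ∈ (pvStepA X a).keys ↔ c = a ∨ c ∈ X.keys := by
        intro X
        unfold pvStepA
        by_cases h : X.contains a = true
        · simp [h, PySem.Dict.mem_keys_insert]
        · simp only [Bool.not_eq_true] at h
          simp [h, PySem.Dict.mem_keys_insert]
      simp only [List.foldl_cons, ih, hstep, List.mem_cons]
      tauto

-- the break loop is an 'any' over the keys
theorem pvQLoop_eq_any (chars : List String) (X : PySem.Dict Char Int) (l : List Char) :
    pvQLoop chars X l = l.any (fun c => chars.contains (String.ofList [c]) && X.getD c 0 > 1) := by
  induction l with
  | nil => rfl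
  | cons a rest ih =>
      unfold pvQLoop
      by_cases h : (chars.contains (String.ofList [a]) && X.getD a 0 > 1) = true <;>
        simp [ih]

-- B's single pass finds exactly the words with a consonant repeated (or already seen)
theorem pvHasRep_iff (chars : List String) (l : List Char) (seen : PySem.Set Char) :
    pvHasRep chars l seen = true ↔
      ∃ c ∈ l, chars.contains (String.ofList [c]) = true ∧ (c ∈ seen ∨ 2 ≤ l.count c) := by
  induction l generalizing seen with
  | nil => simp [pvHasRep]
  | cons a rest ih =>
      have hcount : ∀ x : Char, List.count x (a :: rest) = List.count x rest + (if x = a then 1 else 0) := by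
        intro x
        rw [List.count_cons]
        by_cases hax : x = a
        · simp [hax]
        · have hax' : ¬ a = x := fun h => hax h.symm
          simp [hax, hax']
      unfold pvHasRep
      by_cases hc : chars.contains (String.ofList [a]) = true
      · by_cases hs : PySem.Set.contains seen a = true
        · have hsm : a ∈ seen := (PySem.Set.contains_iff _ _).1 hs
          rw [if_pos hc, if_pos hs]
          exact iff_of_true rfl ⟨a, List.mem_cons_self, hc, Or.inl hsm⟩
        · have hsm : a ∉ seen := fun h => hs ((PySem.Set.contains_iff _ _).2 h)
          rw [if_pos hc, if_neg hs]
          rw [ih]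
          constructor
          · rintro ⟨c, hcr, hcc, hdisj⟩
            rcases hdisj with hmem | hcnt
            · rw [PySem.Set.mem_add] at hmem
              rcases hmem with hmem | rfl
              · exact ⟨c, List.mem_cons_of_mem _ hcr, hcc, Or.inl hmem⟩
              · refine ⟨c, List.mem_cons_self, hcc, Or.inr ?_⟩
                have h1 : 1 ≤ rest.count c := List.count_pos_iff.2 hcr
                rw [hcount, if_pos rfl]
                omega
            · refine ⟨c, List.mem_cons_of_mem _ hcr, hcc, Or.inr ?_⟩
              rw [hcount]
              split_ifs <;> omega
          · rintro ⟨c, hcr, hcc, hdisj⟩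
            rcases List.mem_cons.1 hcr with rfl | hmem
            · rcases hdisj with hmem | hcnt
              · exact absurd hmem hsm
              · have h1 : 1 ≤ rest.count c := by
                  rw [hcount, if_pos rfl] at hcnt
                  omega
                exact ⟨c, List.count_pos_iff.1 (by omega), hcc,
                  Or.inl ((PySem.Set.mem_add _ _ _).2 (Or.inr rfl))⟩
            · by_cases hca : c = a
              · subst hca
                exact ⟨c, hmem, hcc, Or.inl ((PySem.Set.mem_add _ _ _).2 (Or.inr rfl))⟩
              · rcases hdisj with hmems | hcnt
                · exact ⟨c, hmem, hcc, Or.inl ((PySem.Set.mem_add _ _ _).2 (Or.inl hmems))⟩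
                · refine ⟨c, hmem, hcc, Or.inr ?_⟩
                  rw [hcount, if_neg hca] at hcnt
                  omega
      · rw [if_neg hc]
        rw [ih]
        constructor
        · rintro ⟨c, hcr, hcc, hdisj⟩
          refine ⟨c, List.mem_cons_of_mem _ hcr, hcc, ?_⟩
          have hca : c ≠ a := fun h => hc (h ▸ hcc)
          rcases hdisj with h | h
          · exact Or.inl h
          · exact Or.inr (by rw [hcount, if_neg hca]; omega)
        · rintro ⟨c, hcr, hcc, hdisj⟩
          rcases List.mem_cons.1 hcr with rfl | hmem
          · exact absurd hcc hc
          · have hca : c ≠ a := fun h => hc (h ▸ hcc)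
            refine ⟨c, hmem, hcc, ?_⟩
            rcases hdisj with h | h
            · exact Or.inl h
            · exact Or.inr (by rw [hcount, if_neg hca] at h; omega)

-- per-word agreement of the two decision procedures
theorem pvWord_eq (chars : List String) (word : String) :
    pvWordBad chars word = pvHasRep chars word.toList PySem.Set.empty := by
  rw [Bool.eq_iff_iff]
  unfold pvWordBad pvBuildX
  rw [pvQLoop_eq_any, List.any_eq_true, pvHasRep_iff]
  constructor
  · rintro ⟨c, hck, hcp⟩
    simp only [Bool.and_eq_true, decide_eq_true_eq] at hcp
    have hmem : c ∈ word.toList := by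
      rcases (pvBuildX_mem_keys _ _ _).1 hck with h | h
      · simp at h
      · exact h
    refine ⟨c, hmem, hcp.1, Or.inr ?_⟩
    have := hcp.2
    rw [pvBuildX_getD] at this
    simp at this
    omega
  · rintro ⟨c, hmem, hcc, hdisj⟩
    rcases hdisj with h | hcnt
    · simp [PySem.Set.empty] at h
    · refine ⟨c, (pvBuildX_mem_keys _ _ _).2 (Or.inr hmem), ?_⟩
      simp only [Bool.and_eq_true, decide_eq_true_eq]
      refine ⟨hcc, ?_⟩
      rw [pvBuildX_getD]
      simp
      omega

theorem pvTop (chars : List String) (words : List String) (acc : List String) :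
    words.foldl (fun res word => if pvWordBad chars word = false then res ++ [word] else res) acc
      = acc ++ words.filter (fun word => !pvHasRep chars word.toList PySem.Set.empty) := by
  induction words generalizing acc with
  | nil => simp
  | cons w rest ih =>
      simp only [List.foldl_cons]
      rw [pvWord_eq chars w, ih]
      cases hb : pvHasRep chars w.toList ([] : PySem.Set Char) <;>
        simp [PySem.Set.empty, hb]

-- ===== VERDICT (by name: the statement is the Claim_ definition above) =====
theorem removeNonDistinct_Consonants_spec : Claim_equal_removeNonDistinct_Consonants := by
  intro words chars _
  unfold Spec_removeNonDistinct_Consonants removeNonDistinct_Consonants removeNonDistinct_Consonants_alt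
  rw [pvTop]
  simp
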